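-- pv_equiv track=rewrite | github.com/aprilrian/Programming-Fundamentals | modules_list.py | IsXElmtKeN
-- ===== SOURCE A (Python) =====
-- def prec(n):
--     return n-1
--
-- def Tail(L):
--     return L[1:]
--
-- def FirstElmt(L):
--     if L != []:
--         return L[0]
--
-- def IsEmpty(L):
--     return L == []
--
-- def IsMember(x,L):
--     if IsEmpty(L):
--         return False
--     else:
--         if FirstElmt(L)==x:
--             return True
--         else:
--             return IsMember(x,Tail(L))
--
-- def IsXElmtKeN(x,n,L):
--     if IsMember(x,L):
--         if n == 1 and FirstElmt(L) == x:
--             return True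
--         else:
--             return False or IsXElmtKeN(x,prec(n),Tail(L))
--     else:
--         return False
-- ===== SOURCE B (Python) =====
-- def IsXElmtKeN(x, n, L):
--     i = 1
--     for v in L:
--         if i == n:
--             return v == x
--         i += 1
--     return False
-- ===== Notes on version B (the rewrite author's own statement) =====
-- stated objective: simpler
-- what changed: Replaced the recursive head-stripping with a per-level IsMember rescan of the whole suffix by a single forward scan carrying an index counter that compares the element at position n.
import Mathlib
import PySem

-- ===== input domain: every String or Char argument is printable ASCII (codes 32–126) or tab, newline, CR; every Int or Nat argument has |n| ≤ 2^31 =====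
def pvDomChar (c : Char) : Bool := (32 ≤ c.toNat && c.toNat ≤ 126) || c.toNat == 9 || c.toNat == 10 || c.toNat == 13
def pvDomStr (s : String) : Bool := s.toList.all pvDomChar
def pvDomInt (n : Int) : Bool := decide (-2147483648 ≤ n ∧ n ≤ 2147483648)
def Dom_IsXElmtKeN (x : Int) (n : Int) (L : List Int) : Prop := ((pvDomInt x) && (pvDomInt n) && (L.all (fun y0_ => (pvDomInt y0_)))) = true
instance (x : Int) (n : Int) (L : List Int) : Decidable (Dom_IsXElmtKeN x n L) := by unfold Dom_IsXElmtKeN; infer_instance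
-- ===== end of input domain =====

-- B replaces A's recursion (rescanning the suffix with IsMember at every level) by one forward scan with an index counter; simpler and a single pass.


-- ===== PORT A =====
def pyPrec (n : Int) : Int := n - 1

def pyTail (L : List Int) : List Int := PySem.List.slice L (some 1) none  -- L[1:]

def pyFirstElmt (L : List Int) : Option Int :=
  if L ≠ [] then L.head? else none  -- returns None on []

def pyIsMember (x : Int) (L : List Int) : Bool :=
  if L = [] then false
  else if pyFirstElmt L = some x then true
  else pyIsMember x (pyTail L)
termination_by L.length
decreasing_by
  cases L with
  | nil => simp_all
  | cons h t => simp [pyTail, PySem.List.slice_from_one]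

def IsXElmtKeN (x : Int) (n : Int) (L : List Int) : Bool :=
  if pyIsMember x L then
    if n = 1 ∧ pyFirstElmt L = some x then true
    else false || IsXElmtKeN x (pyPrec n) (pyTail L)
  else false
termination_by L.length
decreasing_by
  cases L with
  | nil => simp [pyIsMember] at *
  | cons h t => simp [pyTail, PySem.List.slice_from_one]

-- ===== PORT B =====
-- the for-loop of Source B: counter i starts at 1, compares at i = n
def altGo (x : Int) (n : Int) (i : Int) : List Int → Bool
  | [] => false
  | v :: t => if i = n then v == x else altGo x n (i + 1) t

def IsXElmtKeN_alt (x : Int) (n : Int) (L : List Int) : Bool := altGo x n 1 L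

-- ===== PRECONDITION & SPEC =====
def Spec_IsXElmtKeN (x : Int) (n : Int) (L : List Int) (out : Bool) : Prop := out = IsXElmtKeN_alt x n L
instance (x : Int) (n : Int) (L : List Int) (out : Bool) : Decidable (Spec_IsXElmtKeN x n L out) := by unfold Spec_IsXElmtKeN; infer_instance

-- ===== CLAIM (what is proved, stated in full; the proofs are below) =====
def Claim_equal_IsXElmtKeN : Prop := ∀ (x : Int) (n : Int) (L : List Int), Dom_IsXElmtKeN x n L → Spec_IsXElmtKeN x n L (IsXElmtKeN x n L)

-- ===== LEMMAS AND PROOFS =====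

-- proof-only middle form: counts n down instead of i up
def altB (x : Int) (n : Int) : List Int → Bool
  | [] => false
  | v :: t => if n = 1 then v == x else altB x (n - 1) t

theorem pyTail_cons (h : Int) (t : List Int) : pyTail (h :: t) = t := by
  simp [pyTail, PySem.List.slice_from_one]

theorem altB_nonpos (x : Int) (n : Int) (L : List Int) (hn : n ≤ 0) :
    altB x n L = false := by
  induction L generalizing n with
  | nil => simp [altB]
  | cons v t ih =>
      simp only [altB]
      rw [if_neg (by omega)]
      exact ih (n - 1) (by omega)

theorem altB_notMember (x : Int) (n : Int) (L : List Int)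
    (h : pyIsMember x L = false) : altB x n L = false := by
  induction L generalizing n with
  | nil => simp [altB]
  | cons v t ih =>
      rw [pyIsMember] at h
      simp only [pyTail_cons] at h
      by_cases hv : pyFirstElmt (v :: t) = some x
      · simp [hv] at h
      · simp only [altB]
        have hvx : (v == x) = false := by
          simp [pyFirstElmt] at hv
          simp [hv]
        split_ifs with h1
        · exact hvx
        · exact ih _ (by simpa [hv] using h)

theorem a_eq_altB (x : Int) (n : Int) (L : List Int) :
    IsXElmtKeN x n L = altB x n L := by
  induction L generalizing n with
  | nil => simp [IsXElmtKeN, pyIsMember, altB]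
  | cons v t ih =>
      rw [IsXElmtKeN]
      by_cases hm : pyIsMember x (v :: t) = true
      · rw [if_pos hm]
        rw [pyTail_cons, pyPrec]
        by_cases h1 : n = 1
        · subst h1
          by_cases hv : pyFirstElmt (v :: t) = some x
          · have hvx : (v == x) = true := by
              simp [pyFirstElmt] at hv; simp [hv]
            simp [altB, hvx]
            exact Or.inl hv
          · have hvx : (v == x) = false := by
              simp [pyFirstElmt] at hv; simp [hv]
            simp only [altB, reduceIte, hvx]
            rw [if_neg (by simp [hv]), Bool.false_or, ih]
            exact altB_nonpos x (1 - 1) t (by omega)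
        · rw [if_neg (by simp [h1]), Bool.false_or, ih]
          simp [altB, h1]
      · rw [if_neg hm]
        exact (altB_notMember x n _ (by simpa using hm)).symm

theorem altGo_eq_altB (x : Int) (n i : Int) (L : List Int) :
    altGo x n i L = altB x (n - i + 1) L := by
  induction L generalizing i with
  | nil => simp [altGo, altB]
  | cons v t ih =>
      simp only [altGo, altB]
      by_cases h : i = n
      · rw [if_pos h, if_pos (by omega)]
      · rw [if_neg h, if_neg (by omega), ih]
        congr 1
        omega

-- ===== VERDICT (by name: the statement is the Claim_ definition above) =====
theorem IsXElmtKeN_spec : Claim_equal_IsXElmtKeN := by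
  intro x n L _
  unfold Spec_IsXElmtKeN IsXElmtKeN_alt
  rw [a_eq_altB, altGo_eq_altB]
  congr 1
  omega
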